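-- pv_equiv track=rewrite | github.com/acoli-repo/book-gen | restructure.py | isConected
-- ===== SOURCE A (Python) =====
-- def isConected(t, s):
-- 	state = 0
-- 	for x in s:
-- 		# if x in t:
-- 		# 	count += 1
-- 		# 	if count == l:
-- 		# 		return True
-- 		if (state == 0) and (x in t):
-- 			state = 1
-- 		elif (state == 1) and (not x in t):
-- 			state = 2
-- 		elif (state == 2) and (x in t):
-- 			return False
--
-- 	return True
-- ===== SOURCE B (Python) =====
-- def isConected(t, s):
--     ts = set(t)
--     pos = [i for i, x in enumerate(s) if x in ts]
--     return not pos or pos[-1] - pos[0] + 1 == len(pos)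
-- ===== Notes on version B (the rewrite author's own statement) =====
-- stated objective: simpler
-- what changed: Replaces A's three-state transition-detecting state machine (with early return) with a boundary-and-count check: build set(t), collect the indices of t-members, and test that last - first + 1 equals their count.
import Mathlib
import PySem

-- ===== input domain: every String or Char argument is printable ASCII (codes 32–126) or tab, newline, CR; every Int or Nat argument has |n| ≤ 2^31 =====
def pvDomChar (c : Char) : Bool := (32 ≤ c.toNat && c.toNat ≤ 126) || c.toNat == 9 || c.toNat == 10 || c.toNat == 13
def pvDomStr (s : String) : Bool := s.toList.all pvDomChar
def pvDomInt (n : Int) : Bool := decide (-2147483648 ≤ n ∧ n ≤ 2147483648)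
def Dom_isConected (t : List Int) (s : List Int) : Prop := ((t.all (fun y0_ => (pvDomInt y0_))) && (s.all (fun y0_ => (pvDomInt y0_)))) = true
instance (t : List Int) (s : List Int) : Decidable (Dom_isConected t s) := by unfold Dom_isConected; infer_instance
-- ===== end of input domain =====

-- B replaces A's three-state run-detecting state machine with a simpler boundary-and-count
-- contiguity check on the list of member indices (same cost, plainer code).


-- ===== PORT A =====
-- the for-loop with its early 'return False', state ∈ {0,1,2}
def isConectedLoop (t : List Int) : List Int → Int → Bool
  | [], _ => true
  | x :: rest, state =>
    if state == 0 && t.contains x then isConectedLoop t rest 1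
    else if state == 1 && !(t.contains x) then isConectedLoop t rest 2
    else if state == 2 && t.contains x then false
    else isConectedLoop t rest state

def isConected (t : List Int) (s : List Int) : Bool := isConectedLoop t s 0

-- ===== PORT B =====
-- enumerate(s) starting at index k
def pyEnumFrom (k : Int) : List Int → List (Int × Int)
  | [] => []
  | x :: rest => (k, x) :: pyEnumFrom (k + 1) rest

def isConected_alt (t : List Int) (s : List Int) : Bool :=
  let ts := PySem.Set.ofList t
  let pos := (pyEnumFrom 0 s).filterMap (fun p => if ts.contains p.2 then some p.1 else none)
  pos.isEmpty || (pos.getLastD 0 - pos.headD 0 + 1 == (pos.length : Int))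

-- ===== PRECONDITION & SPEC =====
def Spec_isConected (t : List Int) (s : List Int) (out : Bool) : Prop := out = isConected_alt t s
instance (t : List Int) (s : List Int) (out : Bool) : Decidable (Spec_isConected t s out) := by unfold Spec_isConected; infer_instance

-- ===== CLAIM (what is proved, stated in full; the proofs are below) =====
def Claim_equal_isConected : Prop := ∀ (t : List Int) (s : List Int), Dom_isConected t s → Spec_isConected t s (isConected t s)

-- ===== LEMMAS AND PROOFS =====

-- the index list B builds, with a generalized starting index
def posOf (t : List Int) (k : Int) : List Int → List Int
  | [] => []
  | x :: rest => if t.contains x then k :: posOf t (k + 1) rest else posOf t (k + 1) rest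

theorem posOf_eq (t : List Int) (k : Int) (s : List Int) :
    (pyEnumFrom k s).filterMap
      (fun p => if (PySem.Set.ofList t).contains p.2 then some p.1 else none) = posOf t k s := by
  induction s generalizing k with
  | nil => rfl
  | cons x rest ih =>
    simp only [pyEnumFrom, List.filterMap_cons, posOf]
    have hc : (PySem.Set.ofList t).contains x = t.contains x := by
      simp [PySem.Set.contains, PySem.Set.mem_ofList]
    rw [hc]
    cases hx : t.contains x
    · simp only [Bool.false_eq_true, if_false]
      exact ih (k + 1)
    · simp only [if_true]
      rw [ih (k + 1)]

-- last element with default 0, in a recursion the proofs can unfold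
def lastD : List Int → Int
  | [] => 0
  | [a] => a
  | _ :: b :: r => lastD (b :: r)

theorem getLastD_eq_lastD : ∀ l : List Int, l.getLastD 0 = lastD l
  | [] => rfl
  | [_] => rfl
  | a :: b :: r => by
    show (a :: b :: r).getLastD 0 = lastD (b :: r)
    rw [← getLastD_eq_lastD (b :: r)]
    simp [List.getLastD_eq_getLast?, List.getLast?_cons_cons]

-- indices in posOf t k s grow from k: the last one satisfies k + count ≤ last + 1
theorem posOf_last_ge (t : List Int) (s : List Int) :
    ∀ k : Int, posOf t k s ≠ [] → k + (posOf t k s).length ≤ lastD (posOf t k s) + 1 := by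
  induction s with
  | nil => intro k h; simp [posOf] at h
  | cons x rest ih =>
    intro k h
    simp only [posOf] at h ⊢
    cases hx : t.contains x <;>
      simp only [hx, Bool.false_eq_true, if_true, if_false] at h ⊢
    · have := ih (k + 1) h
      omega
    · cases hr : posOf t (k + 1) rest with
      | nil => simp [hr, lastD]
      | cons y ys =>
        have := ih (k + 1) (by simp [hr])
        rw [hr] at this
        simp only [lastD, List.length_cons] at this ⊢
        push_cast at this ⊢
        omega

-- state 2: the loop survives iff no member remains
theorem loop2_eq (t : List Int) (s : List Int) :
    ∀ k : Int, isConectedLoop t s 2 = (posOf t k s).isEmpty := by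
  induction s with
  | nil => intro k; rfl
  | cons x rest ih =>
    intro k
    simp only [isConectedLoop, posOf]
    cases hx : t.contains x <;> simp [hx, ih (k + 1)]

-- state 1: the loop survives iff the members occupy a contiguous run starting at the front
theorem loop1_eq (t : List Int) (s : List Int) :
    ∀ k : Int, isConectedLoop t s 1 =
      ((posOf t k s).isEmpty || (lastD (posOf t k s) + 1 == k + ((posOf t k s).length : Int))) := by
  induction s with
  | nil => intro k; rfl
  | cons x rest ih =>
    intro k
    simp only [isConectedLoop, posOf]
    cases hx : t.contains x <;>
      simp only [hx, Bool.false_eq_true, if_true, if_false, Bool.not_false, Bool.not_true,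
        Bool.and_false, Bool.and_true] <;> norm_num
    · rw [loop2_eq t rest (k + 1)]
      cases hr : posOf t (k + 1) rest with
      | nil => simp [hr]
      | cons y ys =>
        have hge := posOf_last_ge t rest (k + 1) (by simp [hr])
        rw [hr] at hge
        simp only [hr, lastD, List.isEmpty_cons, List.length_cons, Bool.false_or] at hge ⊢
        rw [Bool.eq_iff_iff]
        simp only [beq_iff_eq, Bool.false_eq_true, false_iff]
        push_cast at hge ⊢
        omega
    · rw [ih (k + 1)]
      cases hr : posOf t (k + 1) rest with
      | nil => simp [hr, lastD]
      | cons y ys =>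
        simp only [hr, lastD, List.isEmpty_cons, List.length_cons, Bool.false_or]
        rw [Bool.eq_iff_iff]
        simp only [beq_iff_eq]
        push_cast
        omega

-- state 0: the loop survives iff the members form one contiguous run: last - first + 1 = count
theorem loop0_eq (t : List Int) (s : List Int) :
    ∀ k : Int, isConectedLoop t s 0 =
      ((posOf t k s).isEmpty ||
        (lastD (posOf t k s) - (posOf t k s).head?.getD 0 + 1 == ((posOf t k s).length : Int))) := by
  induction s with
  | nil => intro k; rfl
  | cons x rest ih =>
    intro k
    simp only [isConectedLoop, posOf]
    cases hx : t.contains x <;>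
      simp only [hx, Bool.false_eq_true, if_true, if_false, Bool.and_false, Bool.and_true] <;>
      norm_num
    · exact ih (k + 1)
    · rw [loop1_eq t rest (k + 1)]
      cases hr : posOf t (k + 1) rest with
      | nil => simp [hr, lastD]
      | cons y ys =>
        simp only [hr, lastD, List.isEmpty_cons, List.head?_cons, Option.getD_some, List.length_cons, Bool.false_or]
        rw [Bool.eq_iff_iff]
        simp only [beq_iff_eq]
        push_cast
        omega

-- ===== VERDICT (by name: the statement is the Claim_ definition above) =====
theorem isConected_spec : Claim_equal_isConected := by
  intro t s _
  show isConected t s = isConected_alt t s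
  simp only [isConected, isConected_alt, posOf_eq, getLastD_eq_lastD, List.headD_eq_head?]
  exact loop0_eq t s 0
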